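-- pv_equiv track=rewrite | github.com/JohnKepplers/a3200-2015-algs | lab20/Sadovnikov/lab20.py | execute
-- ===== SOURCE A (Python) =====
-- def execute(number_of_sticks, sticks):
--     max = 0
--     if number_of_sticks < 4:
--         return max
--     else:
--         sticks.sort()
--         sticks.reverse()
--         current_max = 0
--         i = 1
--         while i < len(sticks):
--             if sticks[i - 1] - sticks[i] <= 1:
--                 if current_max == 0:
--                     current_max = sticks[i]
--                     i += 1
--                 else:
--                     max += current_max * sticks[i]
--                     current_max = 0
--                     i += 1
--             i += 1
--         return max
-- ===== SOURCE B (Python) =====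
-- def execute(number_of_sticks, sticks):
--     if number_of_sticks < 4:
--         return 0
--     sticks.sort(reverse=True)
--     widths = []
--     i = 0
--     while i + 1 < len(sticks):
--         if sticks[i] - sticks[i + 1] <= 1:
--             widths.append(sticks[i + 1])
--             i += 2
--         else:
--             i += 1
--     area = 0
--     k = 0
--     while k + 1 < len(widths):
--         area += widths[k] * widths[k + 1]
--         k += 2
--     return area
-- ===== Notes on version B (the rewrite author's own statement) =====
-- stated objective: alternative
-- what changed: Instead of one interleaved while-loop with a 0-sentinel pending variable, B sorts descending in place, then makes one pass collecting the matched pair widths into a list and a second pass summing products of adjacent widths.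
-- outside the precondition, e.g. on execute(6, [0, 0, -2, -2, -3, -3]): A returns 6, B returns 0; on execute(4, [1, 0, -1, -1]): A returns 0, B returns 0
import Mathlib
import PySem

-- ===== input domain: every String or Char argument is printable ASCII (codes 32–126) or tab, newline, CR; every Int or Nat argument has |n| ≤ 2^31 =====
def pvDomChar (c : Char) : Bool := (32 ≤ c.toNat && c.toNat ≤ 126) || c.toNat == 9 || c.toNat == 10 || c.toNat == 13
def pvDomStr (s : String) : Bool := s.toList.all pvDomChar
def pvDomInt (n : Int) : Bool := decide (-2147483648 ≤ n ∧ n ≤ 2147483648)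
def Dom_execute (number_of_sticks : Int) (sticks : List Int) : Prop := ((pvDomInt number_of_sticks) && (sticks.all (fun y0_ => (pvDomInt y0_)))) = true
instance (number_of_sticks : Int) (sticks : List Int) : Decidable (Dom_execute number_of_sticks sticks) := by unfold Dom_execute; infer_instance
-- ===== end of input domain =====

-- B replaces A's interleaved 0-sentinel while-loop by two passes (collect matched widths,
-- then sum adjacent products); both mutate `sticks` by sorting it descending (return value proved here).

-- ===== PORT A =====
-- A's while loop: state (max, current_max, i); i starts at 1 and strictly increases,
-- so fuel = sticks.length bounds the iterations; i stays ≥ 1, so Nat indexing is exact.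
def aLoop (s : List Int) : Nat → Int → Int → Nat → Int
  | 0, mx, _, _ => mx
  | f + 1, mx, cm, i =>
    if i < s.length then
      if s.getD (i - 1) 0 - s.getD i 0 ≤ 1 then
        if cm = 0 then aLoop s f mx (s.getD i 0) (i + 2)
        else aLoop s f (mx + cm * s.getD i 0) 0 (i + 2)
      else aLoop s f mx cm (i + 1)
    else mx

def execute (number_of_sticks : Int) (sticks : List Int) : Int :=
  if number_of_sticks < 4 then 0
  else
    let s := (PySem.List.sorted sticks (fun x => x) false).reverse
    aLoop s s.length 0 0 1

-- ===== PORT B =====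
-- first pass: collect matched pair widths (i advances ≥ 1 per step, fuel = length suffices)
def widthsLoop (s : List Int) : Nat → Nat → List Int
  | 0, _ => []
  | f + 1, i =>
    if i + 1 < s.length then
      if s.getD i 0 - s.getD (i + 1) 0 ≤ 1 then
        s.getD (i + 1) 0 :: widthsLoop s f (i + 2)
      else widthsLoop s f (i + 1)
    else []

-- second pass: area += widths[k] * widths[k+1], k += 2
def strideLoop (w : List Int) : Nat → Nat → Int → Int
  | 0, _, area => area
  | f + 1, k, area =>
    if k + 1 < w.length then
      strideLoop w f (k + 2) (area + w.getD k 0 * w.getD (k + 1) 0)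
    else area

def execute_alt (number_of_sticks : Int) (sticks : List Int) : Int :=
  if number_of_sticks < 4 then 0
  else
    let s := PySem.List.sorted sticks (fun x => x) true
    let w := widthsLoop s s.length 0
    strideLoop w w.length 0 0

-- ===== PRECONDITION & SPEC =====
-- Pre_ excludes lists containing both a zero and a negative element: negative "lengths" are outside
-- the task's natural domain, and exactly there a matched width of 0 can coincide with A's
-- 0-means-no-pending sentinel and misalign the pairing (A returns an accidental value there).
def Pre_execute (number_of_sticks : Int) (sticks : List Int) : Prop :=
  (0 : Int) ∉ sticks ∨ ∀ x ∈ sticks, 0 ≤ x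
instance (number_of_sticks : Int) (sticks : List Int) : Decidable (Pre_execute number_of_sticks sticks) := by
  unfold Pre_execute; infer_instance

def pvWitness_execute : Int × List Int := (4, [3, 3, 2, 2])

def Spec_execute (number_of_sticks : Int) (sticks : List Int) (out : Int) : Prop := out = execute_alt number_of_sticks sticks
instance (number_of_sticks : Int) (sticks : List Int) (out : Int) : Decidable (Spec_execute number_of_sticks sticks out) := by unfold Spec_execute; infer_instance

-- ===== CLAIM (what is proved, stated in full; the proofs are below) =====
def Claim_equal_execute : Prop := ∀ (number_of_sticks : Int) (sticks : List Int), Dom_execute number_of_sticks sticks → Pre_execute number_of_sticks sticks → Spec_execute number_of_sticks sticks (execute number_of_sticks sticks)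

-- ===== LEMMAS AND PROOFS =====

-- A's sentinel processing of the width sequence, at list level
def pairsA : Int → List Int → Int
  | _, [] => 0
  | cm, w :: ws => if cm = 0 then pairsA w ws else cm * w + pairsA 0 ws

-- B's adjacent-pair products, at list level
def pairsB : List Int → Int
  | [] => 0
  | [_] => 0
  | a :: b :: ws => a * b + pairsB ws

-- both sorts produce the same descending list of Ints
lemma sorted_rev_eq (xs : List Int) :
    (PySem.List.sorted xs (fun x => x) false).reverse = PySem.List.sorted xs (fun x => x) true := by
  refine List.Perm.eq_of_pairwise (le := fun a b : Int => b ≤ a)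
    (fun a b _ _ h1 h2 => le_antisymm h2 h1) ?_ ?_ ?_
  · exact List.pairwise_reverse.mpr
      (PySem.List.sorted_pairwise (xs := xs) (key := fun x : Int => x))
  · exact PySem.List.sorted_pairwise_rev (xs := xs) (key := fun x : Int => x)
  · exact ((List.reverse_perm _).trans
      (PySem.List.sorted_perm (key := fun x : Int => x) (rev := false) (xs := xs))).trans
      (PySem.List.sorted_perm (key := fun x : Int => x) (rev := true) (xs := xs)).symm

-- A's loop at index j+1 computes pairsA over B's widths from index j
lemma aLoop_eq_pairsA (s : List Int) :
    ∀ (f : Nat) (mx cm : Int) (j : Nat),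
      aLoop s f mx cm (j + 1) = mx + pairsA cm (widthsLoop s f j) := by
  intro f
  induction f with
  | zero => intro mx cm j; simp [aLoop, widthsLoop, pairsA]
  | succ f ih =>
    intro mx cm j
    simp only [aLoop, widthsLoop, Nat.add_sub_cancel]
    by_cases h1 : j + 1 < s.length
    · simp only [h1, if_pos]
      by_cases h2 : s.getD j 0 - s.getD (j + 1) 0 ≤ 1
      · simp only [h2, if_pos]
        by_cases h3 : cm = 0
        · simp only [h3, if_pos rfl]
          have := ih mx (s.getD (j + 1) 0) (j + 2)
          simpa [pairsA, Nat.add_assoc] using this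
        · simp only [if_neg h3]
          have := ih (mx + cm * s.getD (j + 1) 0) 0 (j + 2)
          simp only [pairsA, if_neg h3]
          rw [show j + 1 + 2 = j + 2 + 1 by omega, this]
          ring
      · simp only [h2, if_neg, if_false]
        have := ih mx cm (j + 1)
        simpa [Nat.add_assoc] using this
    · simp [h1, pairsA]

-- B's stride loop computes pairsB of the remaining suffix
lemma strideLoop_eq_pairsB (w : List Int) :
    ∀ (f k : Nat) (area : Int), w.length ≤ f + k →
      strideLoop w f k area = area + pairsB (w.drop k) := by
  intro f
  induction f with
  | zero =>
    intro k area h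
    have : w.drop k = [] := List.drop_eq_nil_of_le (by omega)
    simp [strideLoop, this, pairsB]
  | succ f ih =>
    intro k area h
    simp only [strideLoop]
    by_cases hk : k + 1 < w.length
    · simp only [hk, if_pos]
      have hk0 : k < w.length := by omega
      have hd : w.drop k = w[k] :: w[k+1] :: w.drop (k + 2) := by
        rw [List.drop_eq_getElem_cons hk0, List.drop_eq_getElem_cons hk]
      rw [ih (k + 2) _ (by omega), hd]
      simp [pairsB, List.getD_eq_getElem, hk0, hk]
      ring
    · simp only [hk, if_neg, if_false]
      rcases Nat.lt_or_ge k w.length with hlt | hge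
      · have : w.drop k = [w[k]] := by
          rw [List.drop_eq_getElem_cons hlt]
          have : w.drop (k + 1) = [] := List.drop_eq_nil_of_le (by omega)
          simp [this]
        simp [this, pairsB]
      · have : w.drop k = [] := List.drop_eq_nil_of_le hge
        simp [this, pairsB]

-- every width is an element of s with index > j
lemma mem_widthsLoop (s : List Int) :
    ∀ (f j : Nat) (x : Int), x ∈ widthsLoop s f j →
      ∃ m, j < m ∧ ∃ h : m < s.length, x = s[m] := by
  intro f
  induction f with
  | zero => intro j x hx; simp [widthsLoop] at hx
  | succ f ih =>
    intro j x hx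
    simp only [widthsLoop] at hx
    by_cases h1 : j + 1 < s.length
    · simp only [h1, if_pos] at hx
      by_cases h2 : s.getD j 0 - s.getD (j + 1) 0 ≤ 1
      · simp only [h2, if_pos] at hx
        rcases List.mem_cons.mp hx with rfl | hx
        · exact ⟨j + 1, by omega, h1, by simp [List.getD_eq_getElem, h1]⟩
        · obtain ⟨m, hm, hlt, rfl⟩ := ih (j + 2) x hx
          exact ⟨m, by omega, hlt, rfl⟩
      · simp only [h2, if_neg, if_false] at hx
        obtain ⟨m, hm, hlt, rfl⟩ := ih (j + 1) x hx
        exact ⟨m, by omega, hlt, rfl⟩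
    · simp [h1] at hx

-- widths inherit the descending order of s
lemma widthsLoop_pairwise (s : List Int) (hs : s.Pairwise (fun a b => b ≤ a)) :
    ∀ (f j : Nat), (widthsLoop s f j).Pairwise (fun a b => b ≤ a) := by
  intro f
  induction f with
  | zero => intro j; simp [widthsLoop]
  | succ f ih =>
    intro j
    simp only [widthsLoop]
    by_cases h1 : j + 1 < s.length
    · simp only [h1, if_pos]
      by_cases h2 : s.getD j 0 - s.getD (j + 1) 0 ≤ 1
      · simp only [h2, if_pos]
        refine List.pairwise_cons.mpr ⟨?_, ih (j + 2)⟩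
        intro x hx
        obtain ⟨m, hm, hlt, rfl⟩ := mem_widthsLoop s f (j + 2) x hx
        have := List.pairwise_iff_getElem.mp hs (j + 1) m h1 hlt (by omega)
        simpa [List.getD_eq_getElem, h1] using this
      · simp only [h2, if_neg, if_false]; exact ih (j + 1)
    · simp [h1]

-- core: the sentinel fold equals adjacent-pair products when no width is 0,
-- or when the widths are nonnegative and descending
lemma pairsA_eq_pairsB (ws : List Int)
    (h : (∀ w ∈ ws, w ≠ 0) ∨ (ws.Pairwise (fun a b => b ≤ a) ∧ ∀ w ∈ ws, 0 ≤ w)) :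
    pairsA 0 ws = pairsB ws := by
  induction ws using pairsB.induct with
  | case1 => simp [pairsA, pairsB]
  | case2 a =>
    by_cases ha : a = 0 <;> simp [pairsA, pairsB, ha]
  | case3 a b ws ih =>
    by_cases ha : a = 0
    · rcases h with h | ⟨hp, hn⟩
      · exact absurd ha (h a (by simp))
      · subst ha
        have hb0 : b = 0 := le_antisymm
          (by simpa using (List.pairwise_cons.mp hp).1 b (by simp)) (hn b (by simp))
        subst hb0
        have hws : pairsA 0 ws = pairsB ws := ih (Or.inr ⟨(List.pairwise_cons.mp (List.pairwise_cons.mp hp).2).2,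
          fun w hw => hn w (by simp [hw])⟩)
        simp [pairsA, pairsB, hws]
    · have step : pairsA 0 (a :: b :: ws) = a * b + pairsA 0 ws := by
        simp [pairsA, ha]
      rw [step, pairsB]
      congr 1
      apply ih
      rcases h with h | ⟨hp, hn⟩
      · exact Or.inl fun w hw => h w (by simp [hw])
      · exact Or.inr ⟨(List.pairwise_cons.mp (List.pairwise_cons.mp hp).2).2,
          fun w hw => hn w (by simp [hw])⟩

-- ===== VERDICT (by name: the statement is the Claim_ definition above) =====
theorem execute_spec : Claim_equal_execute := by
  intro n sticks _ hpre
  unfold Spec_execute execute execute_alt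
  by_cases hn : n < 4
  · simp [hn]
  · simp only [hn, if_neg, if_false]
    rw [← sorted_rev_eq]
    set s := (PySem.List.sorted sticks (fun x => x) false).reverse with hsdef
    have hlen : s.length = sticks.length := by
      simp [hsdef, PySem.List.length_sorted]
    have hmem : ∀ x : Int, x ∈ s ↔ x ∈ sticks := by
      intro x; simp [hsdef, PySem.List.mem_sorted]
    have hsort : s.Pairwise (fun a b : Int => b ≤ a) := by
      rw [hsdef, sorted_rev_eq]
      exact PySem.List.sorted_pairwise_rev (xs := sticks) (key := fun x : Int => x)
    rw [aLoop_eq_pairsA s s.length 0 0 0,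
        strideLoop_eq_pairsB _ _ 0 0 (by omega)]
    simp only [List.drop_zero, zero_add]
    apply pairsA_eq_pairsB
    have hsub : ∀ w ∈ widthsLoop s s.length 0, w ∈ sticks := by
      intro w hw
      obtain ⟨m, _, hlt, rfl⟩ := mem_widthsLoop s s.length 0 w hw
      exact (hmem _).mp (List.getElem_mem hlt)
    rcases hpre with h0 | hpos
    · exact Or.inl fun w hw h => h0 (by rw [← h]; exact hsub w hw)
    · exact Or.inr ⟨widthsLoop_pairwise s hsort s.length 0, fun w hw => hpos w (hsub w hw)⟩
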